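-- pv_equiv track=rewrite | github.com/EmadEJ/MIR-imdb | Logic/core/spell_correction.py | shingle_word
-- ===== SOURCE A (Python) =====
-- def shingle_word(word, k=2):
--     """
--     Convert a word into a set of shingles.
--
--     Parameters
--     ----------
--     word : str
--         The input word.
--     k : int
--         The size of each shingle.
--
--     Returns
--     -------
--     set
--         A set of shingles.
--     """
--     shingles = set()
--
--     if len(word) < k:
--         shingles.add(word)
--
--     for i in range(len(word) - k + 1):
--         shingle = word[i:i+k]
--         shingles.add(shingle)
--
--     return shingles
-- ===== SOURCE B (Python) =====
-- def shingle_word(word, k=2):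
--     # Idiomatic rewrite: a word shorter than k is its own single shingle;
--     # otherwise zip the k shifted suffixes of the word and join each
--     # k-tuple of characters, instead of slicing at every start index.
--     if len(word) < k:
--         return {word}
--     return set(map(''.join, zip(*(word[j:] for j in range(k)))))
-- ===== Notes on version B (the rewrite author's own statement) =====
-- stated objective: idiomatic
-- what changed: B forms the shingles by zipping the k shifted suffixes of the word and joining each k-tuple of characters, instead of A's index loop slicing word[i:i+k] at every start position; the whole-word guard for short words is kept.
-- outside the precondition, e.g. on shingle_word('ab', 0): A returns {''}, B returns set()
import Mathlib
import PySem

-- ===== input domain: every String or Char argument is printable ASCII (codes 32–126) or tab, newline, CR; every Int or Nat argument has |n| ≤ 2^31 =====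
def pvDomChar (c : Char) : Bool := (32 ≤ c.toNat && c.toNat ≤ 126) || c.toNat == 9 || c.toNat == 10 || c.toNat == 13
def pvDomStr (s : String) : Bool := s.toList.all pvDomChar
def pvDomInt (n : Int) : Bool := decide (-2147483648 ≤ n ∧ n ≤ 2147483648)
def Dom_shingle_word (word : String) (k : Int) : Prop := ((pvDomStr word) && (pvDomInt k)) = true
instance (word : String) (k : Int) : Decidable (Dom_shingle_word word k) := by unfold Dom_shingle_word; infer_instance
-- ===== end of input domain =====

-- B replaces A's index-and-slice loop by zipping the k shifted suffixes of the
-- word and joining each k-tuple of characters (idiomatic; same cost).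

-- ===== PORT A =====
def shingle_word (word : String) (k : Int) : List String :=
  let shingles : PySem.Set String := PySem.Set.empty
  let shingles := if PySem.Str.len word < k then PySem.Set.add shingles word else shingles
  (PySem.List.pyRange 0 (PySem.Str.len word - k + 1) 1).foldl
    (fun s i => PySem.Set.add s (PySem.Str.slice word (some i) (some (i + k)))) shingles

-- ===== PORT B =====
-- zip(*iterables) over a variable number k of strings, ported by hand: iterating a
-- Python str yields its characters, so each column is a List Char and each produced
-- tuple a List Char; exact step for step (stop as soon as some column is exhausted).
def pvZipAll (cols : List (List Char)) : List (List Char) :=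
  if h : cols ≠ [] ∧ cols.all (fun l => !l.isEmpty) then
    (cols.map (fun l => l.headD ' ')) :: pvZipAll (cols.map List.tail)
  else []
termination_by (cols.headD []).length
decreasing_by
  obtain ⟨h1, h2⟩ := h
  cases cols with
  | nil => exact absurd rfl h1
  | cons c rest =>
    simp only [List.all_cons, Bool.and_eq_true, Bool.not_eq_true', List.isEmpty_eq_false_iff]
      at h2
    have hpos : 0 < c.length := List.length_pos_of_ne_nil h2.1
    simp only [List.attach_cons, List.map_cons, List.headD_cons, List.length_tail]
    omega

def shingle_word_alt (word : String) (k : Int) : List String :=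
  -- ''.join over a tuple of characters is the string of those characters (String.ofList)
  if PySem.Str.len word < k then PySem.Set.ofList [word]
  else
    let cols := (PySem.List.pyRange 0 k 1).map (fun j => (PySem.Str.slice word (some j) none).toList)
    PySem.Set.ofList ((pvZipAll cols).map String.ofList)

-- ===== PRECONDITION & SPEC =====
-- Pre_ excludes non-positive shingle sizes k, outside the natural domain of the task:
-- there A returns a one-element set holding the empty string, an artefact of every
-- slice word[i:i+k] being empty, while B's zip of zero suffixes yields the empty set.
def Pre_shingle_word (word : String) (k : Int) : Prop := 1 ≤ k
instance (word : String) (k : Int) : Decidable (Pre_shingle_word word k) := by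
  unfold Pre_shingle_word; infer_instance
def pvWitness_shingle_word : String × Int := ("abc", 2)

def Spec_shingle_word (word : String) (k : Int) (out : List String) : Prop := out = shingle_word_alt word k
instance (word : String) (k : Int) (out : List String) : Decidable (Spec_shingle_word word k out) := by unfold Spec_shingle_word; infer_instance

-- ===== CLAIM (what is proved, stated in full; the proofs are below) =====
def Claim_equal_shingle_word : Prop := ∀ (word : String) (k : Int), Dom_shingle_word word k → Pre_shingle_word word k → Spec_shingle_word word k (shingle_word word k)

-- ===== LEMMAS AND PROOFS =====

-- heads of the K shifted suffixes of cs = the first K characters of cs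
theorem pv_heads (cs : List Char) (K : Nat) (hK : K ≤ cs.length) :
    (List.range K).map (fun j => ((cs.drop j).headD ' ')) = cs.take K := by
  apply List.ext_getElem
  · simp [Nat.min_eq_left hK]
  · intro i h1 h2
    simp only [List.getElem_map, List.getElem_range, List.getElem_take]
    rw [List.headD_eq_head?_getD, List.head?_drop]
    have : i < cs.length := by simp at h2; omega
    simp [List.getElem?_eq_getElem this]

-- zipping the K shifted suffixes of cs produces exactly the K-windows of cs
theorem pv_zipAll_windows (K : Nat) (hK : 1 ≤ K) : ∀ cs : List Char,
    pvZipAll ((List.range K).map (fun j => cs.drop j)) =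
      (List.range (cs.length + 1 - K)).map (fun i => (cs.drop i).take K) := by
  intro cs
  induction cs with
  | nil =>
    rw [pvZipAll]
    have hempty : ([] : List Char).drop (K - 1) = [] := by simp
    have : ¬ (((List.range K).map (fun j => ([] : List Char).drop j)).all
        (fun l => !l.isEmpty) = true) := by
      simp only [List.all_map, List.all_eq_true, List.mem_range]
      push_neg
      exact ⟨K - 1, by omega, by simp⟩
    simp only [this, dite_false]
    simp [List.length_nil, Nat.sub_eq_zero_of_le hK]
  | cons c t ih =>
    by_cases hle : K ≤ t.length + 1
    · -- every column is nonempty: recurse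
      have hall : ((List.range K).map (fun j => (c :: t).drop j)).all
          (fun l => !l.isEmpty) = true := by
        simp only [List.all_map, List.all_eq_true, List.mem_range]
        intro j hj
        simp only [Function.comp_apply, Bool.not_eq_true', List.isEmpty_eq_false_iff, ne_eq]
        intro hnil
        have hlen := congrArg List.length hnil
        simp at hlen
        omega
      have hne : ((List.range K).map (fun j => (c :: t).drop j)) ≠ [] := by
        simp [hK]; omega
      rw [pvZipAll]
      simp only [hne, hall, and_true, ne_eq, not_false_iff, dite_true]
      have htails : ((List.range K).map (fun j => (c :: t).drop j)).map List.tail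
          = (List.range K).map (fun j => t.drop j) := by
        simp only [List.map_map]
        apply List.map_congr_left
        intro j _
        simp [List.tail_drop]
      rw [htails, ih]
      have hheads : ((List.range K).map (fun j => (c :: t).drop j)).map
          (fun l => l.headD ' ') = (c :: t).take K := by
        rw [List.map_map]
        exact pv_heads (c :: t) K (by simpa using hle)
      rw [hheads]
      have hsplit : (c :: t).length + 1 - K = (t.length + 1 - K) + 1 := by
        simp; omega
      rw [hsplit, List.range_succ_eq_map, List.map_cons, List.map_map]
      simp [Function.comp]
    · -- some column is empty: both sides are []
      rw [pvZipAll]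
      have : ¬ (((List.range K).map (fun j => (c :: t).drop j)).all
          (fun l => !l.isEmpty) = true) := by
        simp only [List.all_map, List.all_eq_true, List.mem_range]
        push_neg
        refine ⟨K - 1, by omega, ?_⟩
        have : (c :: t).drop (K - 1) = [] := by
          apply List.drop_eq_nil_of_le
          simp; omega
        simp [this]
      simp only [this, dite_false]
      rw [show (c :: t).length + 1 - K = 0 from by simp; omega]
      simp

-- the two ports produce the same list of shingle strings
theorem pv_lists_eq (word : String) (k : Int) (hk : 1 ≤ k) :
    (PySem.List.pyRange 0 (PySem.Str.len word - k + 1) 1).map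
        (fun i => PySem.Str.slice word (some i) (some (i + k)))
      = (pvZipAll ((PySem.List.pyRange 0 k 1).map
          (fun j => (PySem.Str.slice word (some j) none).toList))).map String.ofList := by
  set cs := word.toList with hcs
  set K := k.toNat with hKdef
  have hkK : k = (K : Int) := by omega
  have hK1 : 1 ≤ K := by omega
  -- B's columns are the K shifted suffixes of cs
  have hcols : (PySem.List.pyRange 0 k 1).map
      (fun j => (PySem.Str.slice word (some j) none).toList)
      = (List.range K).map (fun j => cs.drop j) := by
    rw [PySem.List.pyRange_one]
    simp only [Int.sub_zero, List.map_map]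
    apply List.map_congr_left
    intro j _
    simp only [Function.comp_apply, PySem.Str.toList_slice, PySem.Chars.slice_eq_listSlice,
      zero_add, ← hcs]
    exact PySem.List.slice_from_natCast cs j
  rw [hcols, pv_zipAll_windows K hK1 cs]
  -- A's index range is 0 .. cs.length - K
  rw [PySem.List.pyRange_one]
  have hlen : PySem.Str.len word = (cs.length : Int) := by
    simp [PySem.Str.len_eq, hcs]
  have hcount : (PySem.Str.len word - k + 1 - 0).toNat = cs.length + 1 - K := by
    rw [hlen, hkK]; omega
  rw [hcount]
  simp only [List.map_map]
  apply List.map_congr_left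
  intro i _
  simp only [Function.comp_apply, zero_add]
  rw [← String.toList_inj]
  have : (String.ofList ((cs.drop i).take K)).toList = (cs.drop i).take K := by
    simp
  rw [this, PySem.Str.toList_slice, PySem.Chars.slice_eq_listSlice, ← hcs, hkK]
  exact PySem.List.slice_natCast_add cs i K

-- ===== VERDICT (by name: the statement is the Claim_ definition above) =====
theorem shingle_word_spec : Claim_equal_shingle_word := by
  intro word k _hdom hk
  unfold Spec_shingle_word shingle_word shingle_word_alt
  dsimp only
  by_cases hlt : PySem.Str.len word < k
  · -- short word: A's index range is empty, both sides are [word]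
    have hlen : (word.length : Int) < k := by simpa using hlt
    have hnil' : PySem.List.pyRange 0 ((word.length : Int) - k + 1) 1 = [] := by
      apply PySem.List.pyRange_one_eq_nil
      omega
    simp [hnil', hlen, PySem.Set.ofList, PySem.Set.add, PySem.Set.contains,
      PySem.Set.empty]
  · simp only [hlt, if_false]
    rw [PySem.Set.ofList_eq_foldl, ← pv_lists_eq word k hk, List.foldl_map]
    rfl
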